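-- pv_equiv track=rewrite | github.com/JLavanya03/Banking-Report-Generator | report.py | detect_status_col
-- ===== SOURCE A (Python) =====
-- from typing import Tuple, Optional, List
--
-- def detect_status_col(cols: List[str]) -> Optional[str]:
--     candidates = ["status", "current_status", "acct_status", "state"]
--     for col in cols:
--         if col.strip().lower() in candidates:
--             return col
--     for col in cols:
--         if "status" in col.lower() or "state" in col.lower():
--             return col
--     return None
-- ===== SOURCE B (Python) =====
-- from typing import Optional, List
--
-- def detect_status_col(cols: List[str]) -> Optional[str]:
--     # Rank each column: 0 = exact candidate name, 1 = substring match, 2 = neither;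
--     # keep the first column achieving the smallest rank seen so far.
--     def rank(col: str) -> int:
--         if col.strip().lower() in ("status", "current_status", "acct_status", "state"):
--             return 0
--         low = col.lower()
--         return 1 if ("status" in low or "state" in low) else 2
--     best = None  # (rank, col)
--     for col in cols:
--         r = rank(col)
--         if best is None or r < best[0]:
--             best = (r, col)
--     return best[1] if best is not None and best[0] < 2 else None
-- ===== Notes on version B (the rewrite author's own statement) =====
-- stated objective: alternative
-- what changed: Instead of two staged scans (exact names first, then substring matches), B assigns every column a numeric rank (0 exact, 1 substring, 2 neither) and selects the first column of minimal rank in one stable-min fold, returning it when its rank is below 2.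
import Mathlib
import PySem

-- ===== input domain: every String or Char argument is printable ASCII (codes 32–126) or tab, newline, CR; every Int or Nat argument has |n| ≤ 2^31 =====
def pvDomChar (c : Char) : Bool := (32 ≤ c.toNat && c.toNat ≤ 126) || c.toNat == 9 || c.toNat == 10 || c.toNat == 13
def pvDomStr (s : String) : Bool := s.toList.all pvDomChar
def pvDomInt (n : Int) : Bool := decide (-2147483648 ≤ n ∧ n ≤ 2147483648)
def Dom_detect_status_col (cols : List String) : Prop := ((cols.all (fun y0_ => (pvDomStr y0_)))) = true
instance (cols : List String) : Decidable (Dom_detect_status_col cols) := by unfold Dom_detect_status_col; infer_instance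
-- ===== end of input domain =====

-- B changes: the two staged scans are replaced by ranking every column (0 exact, 1 substring, 2 neither)
-- and taking the first column of minimal rank in one fold (alternative decomposition, same cost).

-- ===== PORT A =====
-- first loop of A: return the first col whose strip().lower() is exactly one of the candidate names
def dscLoop1 (cols : List String) : Option String :=
  match cols with
  | [] => none
  | col :: rest =>
    if (["status", "current_status", "acct_status", "state"] : List String).contains
        (PySem.Str.lower (PySem.Str.strip col)) then some col
    else dscLoop1 rest

-- second loop of A: return the first col whose lower() contains "status" or "state"
def dscLoop2 (cols : List String) : Option String :=
  match cols with
  | [] => none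
  | col :: rest =>
    if PySem.Str.isIn "status" (PySem.Str.lower col) || PySem.Str.isIn "state" (PySem.Str.lower col)
    then some col
    else dscLoop2 rest

def detect_status_col (cols : List String) : Option String :=
  match dscLoop1 cols with
  | some c => some c
  | none =>
    match dscLoop2 cols with
    | some c => some c
    | none => none

-- ===== PORT B =====
-- rank(col): 0 = exact candidate name, 1 = substring match, 2 = neither
def dscRank (col : String) : Nat :=
  if (["status", "current_status", "acct_status", "state"] : List String).contains
      (PySem.Str.lower (PySem.Str.strip col)) then 0
  else if PySem.Str.isIn "status" (PySem.Str.lower col) || PySem.Str.isIn "state" (PySem.Str.lower col)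
  then 1
  else 2

-- the fold: keep the first (rank, col) pair of strictly smallest rank
def dscBestLoop (cols : List String) (best : Option (Nat × String)) : Option (Nat × String) :=
  match cols with
  | [] => best
  | col :: rest =>
    dscBestLoop rest
      (match best with
       | none => some (dscRank col, col)
       | some b => if dscRank col < b.1 then some (dscRank col, col) else some b)

def detect_status_col_alt (cols : List String) : Option String :=
  match dscBestLoop cols none with
  | some (r, c) => if r < 2 then some c else none
  | none => none

-- ===== PRECONDITION & SPEC =====
def Spec_detect_status_col (cols : List String) (out : Option String) : Prop := out = detect_status_col_alt cols
instance (cols : List String) (out : Option String) : Decidable (Spec_detect_status_col cols out) := by unfold Spec_detect_status_col; infer_instance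

-- ===== CLAIM (what is proved, stated in full; the proofs are below) =====
def Claim_equal_detect_status_col : Prop := ∀ (cols : List String), Dom_detect_status_col cols → Spec_detect_status_col cols (detect_status_col cols)

-- ===== LEMMAS AND PROOFS =====

-- left-biased min by rank, with none as identity on the left and absorbed on the right
def dscMin (a b : Option (Nat × String)) : Option (Nat × String) :=
  match a, b with
  | none, r => r
  | some a, none => some a
  | some a, some r => if r.1 < a.1 then some r else some a

lemma dscMin_assoc (a b c : Option (Nat × String)) :
    dscMin (dscMin a b) c = dscMin a (dscMin b c) := by
  cases a <;> cases b <;> cases c <;> (try rfl) <;>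
    simp only [dscMin] <;> split_ifs <;> (try rfl) <;>
    simp only <;> split_ifs <;> first | rfl | (exfalso; omega)

lemma dscBestLoop_acc (cols : List String) (b : Option (Nat × String)) :
    dscBestLoop cols b = dscMin b (dscBestLoop cols none) := by
  induction cols generalizing b with
  | nil => cases b <;> rfl
  | cons col rest ih =>
    simp only [dscBestLoop]
    generalize dscRank col = r
    have hstep : ∀ (x : Option (Nat × String)),
        (match x with
         | none => some (r, col)
         | some b => if r < b.1 then some (r, col) else some b)
        = dscMin x (some (r, col)) := by
      intro x; cases x with
      | none => rfl
      | some b => rfl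
    rw [hstep b, ih (dscMin b (some (r, col))), ih (some (r, col))]
    exact dscMin_assoc b (some (r, col)) (dscBestLoop rest none)

-- the fold's value, characterised by A's two scans
lemma dscBestLoop_char (cols : List String) :
    dscBestLoop cols none =
      match dscLoop1 cols with
      | some c => some (0, c)
      | none =>
        match dscLoop2 cols with
        | some c => some (1, c)
        | none =>
          match cols with
          | [] => none
          | h :: _ => some (2, h) := by
  induction cols with
  | nil => rfl
  | cons col rest ih =>
    have hc1 : dscLoop1 (col :: rest)
        = if (["status", "current_status", "acct_status", "state"] : List String).contains
            (PySem.Str.lower (PySem.Str.strip col)) then some col else dscLoop1 rest := rfl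
    have hc2 : dscLoop2 (col :: rest)
        = if PySem.Str.isIn "status" (PySem.Str.lower col)
            || PySem.Str.isIn "state" (PySem.Str.lower col) then some col
          else dscLoop2 rest := rfl
    have hbody : dscBestLoop (col :: rest) none
        = dscBestLoop rest (some (dscRank col, col)) := rfl
    rw [hbody, dscBestLoop_acc, ih, hc1, hc2]
    by_cases hex : (["status", "current_status", "acct_status", "state"] : List String).contains
        (PySem.Str.lower (PySem.Str.strip col)) = true
    · have hr : dscRank col = 0 := by unfold dscRank; rw [if_pos hex]
      rw [if_pos hex, hr]
      cases h1 : dscLoop1 rest <;> cases h2 : dscLoop2 rest <;> cases rest <;>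
        simp [dscMin, h1, h2]
    · by_cases hsub : (PySem.Str.isIn "status" (PySem.Str.lower col)
          || PySem.Str.isIn "state" (PySem.Str.lower col)) = true
      · have hr : dscRank col = 1 := by unfold dscRank; rw [if_neg hex, if_pos hsub]
        rw [if_neg hex, if_pos hsub, hr]
        cases h1 : dscLoop1 rest <;> cases h2 : dscLoop2 rest <;> cases rest <;>
          simp [dscMin, h1, h2]
      · have hr : dscRank col = 2 := by unfold dscRank; rw [if_neg hex, if_neg hsub]
        rw [if_neg hex, if_neg hsub, hr]
        cases h1 : dscLoop1 rest <;> cases h2 : dscLoop2 rest <;> cases rest <;>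
          simp [dscMin, h1, h2]

-- ===== VERDICT (by name: the statement is the Claim_ definition above) =====
theorem detect_status_col_spec : Claim_equal_detect_status_col := by
  intro cols _
  unfold Spec_detect_status_col detect_status_col detect_status_col_alt
  rw [dscBestLoop_char]
  cases h1 : dscLoop1 cols <;> cases h2 : dscLoop2 cols <;> cases cols <;> simp [dscMin]
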